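-- pv_equiv track=rewrite | github.com/hanaseol/CanIBuyanAI | src/PlayGame/solve_timing_ai.py | _generate_solve_guess
-- ===== SOURCE A (Python) =====
-- from typing import Tuple, List, Optional
--
-- def _generate_solve_guess(
--
--     showing: str,
--     category: str = None,
--     previous_guesses: List[str] = None
-- ) -> str:
--     """
--     Generate a solve guess by filling in the blanks intelligently.
--
--     This is a simplified implementation - in a full version, this would
--     use more sophisticated NLP and pattern matching.
--     """
--     if previous_guesses is None:
--         previous_guesses = []
--
--     # For now, use a simple approach: fill blanks with most likely letters
--     guess = showing
--
--     # Common letter frequencies for filling blanks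
--     common_letters = 'ETAOINSHRDLUCMFWYGPBVKJXQZ'
--
--     for letter in common_letters:
--         if letter not in previous_guesses and '_' in guess:
--             # Simple heuristic: try the letter and see if it makes sense
--             # In a full implementation, this would use language models
--             guess = guess.replace('_', letter, 1)
--
--     return guess
-- ===== SOURCE B (Python) =====
-- from typing import List
--
-- def _generate_solve_guess(
--     showing: str,
--     category: str = None,
--     previous_guesses: List[str] = None
-- ) -> str:
--     if previous_guesses is None:
--         previous_guesses = []
--     # Letters available for blanks, in frequency order.
--     avail = [l for l in 'ETAOINSHRDLUCMFWYGPBVKJXQZ'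
--              if l not in previous_guesses]
--     # Split at the blanks and weave the segments back together with one
--     # fill letter per blank ('_' again once the letters run out).
--     parts = showing.split('_')
--     n = len(parts) - 1
--     fills = (avail[:n] + ['_'] * n)[:n]
--     out = parts[0]
--     for f, seg in zip(fills, parts[1:]):
--         out = out + f + seg
--     return out
-- ===== Notes on version B (the rewrite author's own statement) =====
-- stated objective: alternative
-- what changed: Replaces A's 26-iteration loop of repeated single-replacement full-string scans with splitting showing at the underscores once and weaving the segments back together with one available letter per gap.
import Mathlib
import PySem

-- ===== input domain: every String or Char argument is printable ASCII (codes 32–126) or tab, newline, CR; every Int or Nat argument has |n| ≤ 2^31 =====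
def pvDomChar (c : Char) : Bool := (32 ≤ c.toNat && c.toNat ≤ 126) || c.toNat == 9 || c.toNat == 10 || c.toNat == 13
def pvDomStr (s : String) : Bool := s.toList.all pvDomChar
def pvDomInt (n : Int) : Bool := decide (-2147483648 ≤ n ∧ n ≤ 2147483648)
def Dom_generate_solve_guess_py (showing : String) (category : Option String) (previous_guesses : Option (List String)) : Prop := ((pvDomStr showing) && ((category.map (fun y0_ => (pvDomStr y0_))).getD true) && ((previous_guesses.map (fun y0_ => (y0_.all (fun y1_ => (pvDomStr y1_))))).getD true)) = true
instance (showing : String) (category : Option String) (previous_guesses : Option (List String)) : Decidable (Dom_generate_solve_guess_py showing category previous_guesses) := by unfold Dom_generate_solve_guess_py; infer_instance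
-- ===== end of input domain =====

-- B replaces A's 26 repeated replace('_', l, 1) scans with a split-at-blanks /
-- weave-back-with-fill-letters construction; return values proved equal on Dom.

-- ===== PORT A =====
-- str.replace('_', letter, 1): replace the first underscore (exact for 1-char old/new, count 1)
def pvReplaceFirst : List Char → Char → List Char
  | [], _ => []
  | c :: cs, l => if c = '_' then l :: cs else c :: pvReplaceFirst cs l

def generate_solve_guess_py (showing : String) (_category : Option String) (previous_guesses : Option (List String)) : String :=
  let pg := previous_guesses.getD []
  -- for letter in common_letters: if letter not in previous_guesses and '_' in guess: guess = guess.replace('_', letter, 1)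
  let guess := "ETAOINSHRDLUCMFWYGPBVKJXQZ".toList.foldl
    (fun guess letter =>
      if ¬ pg.contains (String.ofList [letter]) ∧ guess.contains '_' then
        pvReplaceFirst guess letter
      else guess)
    showing.toList
  String.ofList guess

-- ===== PORT B =====
-- showing.split('_'): exact for a 1-char separator ("" splits to [""], n blanks give n+1 parts)
def pvSplitU : List Char → List (List Char)
  | [] => [[]]
  | c :: cs =>
    if c = '_' then [] :: pvSplitU cs
    else
      match pvSplitU cs with
      | [] => [[c]]          -- unreachable: pvSplitU never returns []
      | s :: rest => (c :: s) :: rest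

def generate_solve_guess_py_alt (showing : String) (_category : Option String) (previous_guesses : Option (List String)) : String :=
  let pg := previous_guesses.getD []
  let avail := "ETAOINSHRDLUCMFWYGPBVKJXQZ".toList.filter
    (fun l => ¬ pg.contains (String.ofList [l]))
  let parts := pvSplitU showing.toList
  let n := parts.length - 1
  -- fills = (avail[:n] + ['_'] * n)[:n]
  let fills := (avail.take n ++ List.replicate n '_').take n
  -- out = parts[0]; for f, seg in zip(fills, parts[1:]): out = out + f + seg
  let out := (fills.zip parts.tail).foldl (fun out p => out ++ p.1 :: p.2) (parts.headD [])
  String.ofList out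

-- ===== PRECONDITION & SPEC =====
def Spec_generate_solve_guess_py (showing : String) (category : Option String) (previous_guesses : Option (List String)) (out : String) : Prop := out = generate_solve_guess_py_alt showing category previous_guesses
instance (showing : String) (category : Option String) (previous_guesses : Option (List String)) (out : String) : Decidable (Spec_generate_solve_guess_py showing category previous_guesses out) := by unfold Spec_generate_solve_guess_py; infer_instance

-- ===== CLAIM =====
def Claim_equal_generate_solve_guess_py : Prop := ∀ (showing : String) (category : Option String) (previous_guesses : Option (List String)), Dom_generate_solve_guess_py showing category previous_guesses → Spec_generate_solve_guess_py showing category previous_guesses (generate_solve_guess_py showing category previous_guesses)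

-- ===== LEMMAS AND PROOFS =====

-- proof-side intermediate: one pass, consuming the available letters at each '_'
def pvFillPass : List Char → List Char → List Char
  | [], _ => []
  | c :: cs, avail =>
    if c = '_' then
      match avail with
      | [] => '_' :: pvFillPass cs []
      | l :: rest => l :: pvFillPass cs rest
    else c :: pvFillPass cs avail

-- proof-side intermediate: weave segments back with one fill letter per gap
def pvWv : List (List Char) → List Char → List Char
  | [], _ => []
  | [s], _ => s
  | s :: rest, [] => s ++ '_' :: pvWv rest []
  | s :: rest, f :: fs => s ++ f :: pvWv rest fs

-- ---- A's fold = pvFillPass ----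

theorem pvReplaceFirst_no_underscore (g : List Char) (l : Char) (h : g.contains '_' = false) :
    pvReplaceFirst g l = g := by
  induction g with
  | nil => rfl
  | cons c cs ih =>
    simp only [List.contains_cons, Bool.or_eq_false_iff, beq_eq_false_iff_ne] at h
    simp [pvReplaceFirst, Ne.symm h.1, ih h.2]

theorem pvFoldl_eq_fillSeq (p : Char → Prop) [DecidablePred p] (ls g : List Char) :
    ls.foldl (fun guess letter =>
      if p letter ∧ guess.contains '_' = true then pvReplaceFirst guess letter else guess) g
    = (ls.filter (fun l => decide (p l))).foldl (fun guess letter => pvReplaceFirst guess letter) g := by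
  induction ls generalizing g with
  | nil => rfl
  | cons l ls ih =>
    rw [List.foldl_cons, List.filter_cons]
    by_cases hp : p l
    · by_cases hu : g.contains '_' = true
      · rw [if_pos ⟨hp, hu⟩, if_pos (by simpa using hp), List.foldl_cons, ih]
      · rw [if_neg (fun h => hu h.2), if_pos (by simpa using hp), List.foldl_cons,
            pvReplaceFirst_no_underscore g l (by simpa using hu), ih]
    · rw [if_neg (fun h => hp h.1), if_neg (by simpa using hp), ih]

theorem pvFillPass_nil (g : List Char) : pvFillPass g [] = g := by
  induction g with
  | nil => rfl
  | cons c cs ih => by_cases hc : c = '_' <;> simp [pvFillPass, hc, ih]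

theorem pvReplaceFirst_cons_ne (c : Char) (cs : List Char) (l : Char) (hc : c ≠ '_') :
    pvReplaceFirst (c :: cs) l = c :: pvReplaceFirst cs l := by
  simp [pvReplaceFirst, hc]

theorem pvFillSeq_cons_ne (avail : List Char) (c : Char) (cs : List Char) (hc : c ≠ '_') :
    avail.foldl (fun guess letter => pvReplaceFirst guess letter) (c :: cs)
    = c :: avail.foldl (fun guess letter => pvReplaceFirst guess letter) cs := by
  induction avail generalizing cs with
  | nil => rfl
  | cons l rest ih => simp [pvReplaceFirst_cons_ne c cs l hc, ih]

theorem pvFillSeq_nil (avail : List Char) :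
    avail.foldl (fun guess letter => pvReplaceFirst guess letter) [] = [] := by
  induction avail with
  | nil => rfl
  | cons l rest ih => simpa [pvReplaceFirst] using ih

theorem pvFillSeq_eq_fillPass (g : List Char) : ∀ avail : List Char,
    (∀ l ∈ avail, l ≠ '_') →
    avail.foldl (fun guess letter => pvReplaceFirst guess letter) g = pvFillPass g avail := by
  induction g with
  | nil => intro avail _; simp [pvFillPass, pvFillSeq_nil]
  | cons c cs ih =>
    intro avail hav
    by_cases hc : c = '_'
    · subst hc
      cases avail with
      | nil => simp [pvFillPass, pvFillPass_nil]
      | cons l rest =>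
        have hl : l ≠ '_' := hav l (by simp)
        simp only [List.foldl_cons]
        rw [show pvReplaceFirst ('_' :: cs) l = l :: cs by simp [pvReplaceFirst]]
        rw [pvFillSeq_cons_ne rest l cs hl, ih rest (fun x hx => hav x (by simp [hx]))]
        simp [pvFillPass]
    · rw [pvFillSeq_cons_ne avail c cs hc, ih avail hav]
      simp [pvFillPass, hc]

-- ---- pvFillPass = weave over the split ----

theorem pvSplitU_ne_nil (g : List Char) : pvSplitU g ≠ [] := by
  cases g with
  | nil => simp [pvSplitU]
  | cons c cs =>
    by_cases hc : c = '_'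
    · simp [pvSplitU, hc]
    · simp only [pvSplitU, if_neg hc]
      cases pvSplitU cs <;> simp

theorem pvWv_cons_head (c : Char) (s : List Char) (rest : List (List Char)) (avail : List Char) :
    pvWv ((c :: s) :: rest) avail = c :: pvWv (s :: rest) avail := by
  cases rest <;> cases avail <;> simp [pvWv]

theorem pvFillPass_eq_wv (g : List Char) : ∀ avail : List Char,
    pvFillPass g avail = pvWv (pvSplitU g) avail := by
  induction g with
  | nil => intro avail; simp [pvFillPass, pvSplitU, pvWv]
  | cons c cs ih =>
    intro avail
    by_cases hc : c = '_'
    · subst hc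
      simp only [pvSplitU]
      cases avail with
      | nil =>
        simp only [pvFillPass]
        rcases h : pvSplitU cs with _ | ⟨s, rest⟩
        · exact absurd h (pvSplitU_ne_nil cs)
        · simp [pvWv, ih, h]
      | cons f fs =>
        simp only [pvFillPass]
        rcases h : pvSplitU cs with _ | ⟨s, rest⟩
        · exact absurd h (pvSplitU_ne_nil cs)
        · simp [pvWv, ih, h]
    · rcases h : pvSplitU cs with _ | ⟨s, rest⟩
      · exact absurd h (pvSplitU_ne_nil cs)
      · have hs : pvSplitU (c :: cs) = (c :: s) :: rest := by
          simp only [pvSplitU, if_neg hc, h]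
        rw [hs, pvWv_cons_head, ← h, ← ih]
        simp [pvFillPass, hc]

-- ---- B's fold over zip = weave ----

-- the fill list consumes one letter (or '_') per gap
theorem pvFills_cons (avail : List Char) (m : ℕ) :
    (avail.take (m + 1) ++ List.replicate (m + 1) '_').take (m + 1)
    = avail.headD '_' :: (avail.tail.take m ++ List.replicate m '_').take m := by
  cases avail with
  | nil =>
    simp [List.replicate_succ, List.take_replicate]
  | cons f fs =>
    simp only [List.take_succ_cons, List.cons_append, List.headD_cons, List.tail_cons]
    congr 1
    -- (fs.take m ++ replicate (m+1) '_').take m = (fs.take m ++ replicate m '_').take m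
    rw [List.take_append, List.take_append]
    congr 1
    rw [List.take_replicate, List.take_replicate]
    congr 1
    omega

theorem pvFoldl_append (l : List (Char × List Char)) (acc : List Char) :
    l.foldl (fun out p => out ++ p.1 :: p.2) acc = acc ++ l.flatMap (fun p => p.1 :: p.2) := by
  induction l generalizing acc with
  | nil => simp
  | cons x xs ih => simp [ih]

theorem pvZipWeave (rest : List (List Char)) : ∀ (avail s : List Char),
    s ++ ((((avail.take rest.length ++ List.replicate rest.length '_').take rest.length).zip rest).flatMap
          (fun p => p.1 :: p.2))
    = pvWv (s :: rest) avail := by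
  induction rest with
  | nil => intro avail s; simp [pvWv]
  | cons t rs ih =>
    intro avail s
    rw [show (t :: rs).length = rs.length + 1 from rfl, pvFills_cons]
    cases avail with
    | nil =>
      simp only [List.tail_nil, List.headD_nil, List.zip_cons_cons, List.flatMap_cons]
      rw [show pvWv (s :: t :: rs) [] = s ++ '_' :: pvWv (t :: rs) [] from rfl, ← ih [] t]
      simp
    | cons f fs =>
      simp only [List.tail_cons, List.headD_cons, List.zip_cons_cons, List.flatMap_cons]
      rw [show pvWv (s :: t :: rs) (f :: fs) = s ++ f :: pvWv (t :: rs) fs from rfl, ← ih fs t]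
      simp

-- ===== VERDICT =====
theorem generate_solve_guess_py_spec : Claim_equal_generate_solve_guess_py := by
  intro showing category previous_guesses _
  unfold Spec_generate_solve_guess_py generate_solve_guess_py generate_solve_guess_py_alt
  simp only
  rw [pvFoldl_eq_fillSeq
        (fun l => ¬ (previous_guesses.getD []).contains (String.ofList [l]) = true)]
  have hno : '_' ∉ "ETAOINSHRDLUCMFWYGPBVKJXQZ".toList := by decide
  rw [pvFillSeq_eq_fillPass _ _
        (fun l hl e => hno (e ▸ (List.mem_filter.mp hl).1))]
  rw [pvFillPass_eq_wv]
  rcases h : pvSplitU showing.toList with _ | ⟨s, rest⟩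
  · exact absurd h (pvSplitU_ne_nil showing.toList)
  · rw [pvFoldl_append]
    simp only [List.length_cons, Nat.add_sub_cancel, List.tail_cons, List.headD_cons]
    rw [pvZipWeave]
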